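-- pv_equiv track=rewrite | github.com/sueszli/vector-database-benchmark | dataset/python-mutated/text_embeddings.py | _clean_special_chars
-- ===== SOURCE A (Python) =====
-- def _clean_special_chars(text):
--     if False:
--         return 10
--     special_chars = '!@#$%^&*()_+{}|:"<>?~`-=[]\\;\\\',./'
--     for char in special_chars:
--         text = text.replace(char, '')
--     text = text.replace('\n', ' ').replace('\r', ' ').replace('\t', ' ')
--     text = text.replace('<br />', ' ')
--     return text
-- ===== SOURCE B (Python) =====
-- def _clean_special_chars(text):
--     special = set('!@#$%^&*()_+{}|:"<>?~`-=[]\\;\\\',./')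
--     ws = {'\n': ' ', '\r': ' ', '\t': ' '}
--     return ''.join(ws.get(c, c) for c in text if c not in special)
-- ===== Notes on version B (the rewrite author's own statement) =====
-- stated objective: idiomatic
-- what changed: A makes 37 sequential full-string replace passes (33 per-character deletions, 3 whitespace substitutions, and a '<br />' replace that is dead because '<' was already deleted); B precomputes a special-character set and a whitespace map and builds the result in one pass over the text.
import Mathlib
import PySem

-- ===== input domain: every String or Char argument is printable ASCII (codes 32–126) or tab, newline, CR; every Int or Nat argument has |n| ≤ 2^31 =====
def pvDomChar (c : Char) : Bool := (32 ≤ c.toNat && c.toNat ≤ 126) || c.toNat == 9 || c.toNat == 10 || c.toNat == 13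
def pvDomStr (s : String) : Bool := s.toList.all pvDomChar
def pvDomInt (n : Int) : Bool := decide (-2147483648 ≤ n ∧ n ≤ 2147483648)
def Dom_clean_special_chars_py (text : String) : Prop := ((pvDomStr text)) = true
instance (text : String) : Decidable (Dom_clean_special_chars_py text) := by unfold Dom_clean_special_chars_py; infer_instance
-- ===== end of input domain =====

-- B replaces A's 37 sequential str.replace passes (33 deletions, 3 whitespace maps and a dead
-- '<br />' replace) by a single pass over the text with a precomputed special-char set and a
-- whitespace map (idiomatic one-pass rewrite; no speed claim).

-- ===== PORT A =====
-- the Python's 'if False: return 10' is dead code and is omitted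
def clean_special_chars_py (text : String) : String :=
  let special_chars : String := "!@#$%^&*()_+{}|:\"<>?~`-=[]\\;\\',./"
  let text := special_chars.toList.foldl (fun t ch => PySem.Str.replace t (String.singleton ch) "") text
  let text := PySem.Str.replace (PySem.Str.replace (PySem.Str.replace text "\n" " ") "\r" " ") "\t" " "
  let text := PySem.Str.replace text "<br />" " "
  text

-- ===== PORT B =====
def pvSpecialSet : PySem.Set Char :=
  PySem.Set.ofList "!@#$%^&*()_+{}|:\"<>?~`-=[]\\;\\',./".toList

def pvWsMap : PySem.Dict Char Char :=
  PySem.Dict.mk [('\n', ' '), ('\r', ' '), ('\t', ' ')]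

def clean_special_chars_py_alt (text : String) : String :=
  String.ofList (text.toList.filterMap (fun c =>
    if PySem.Set.contains pvSpecialSet c then none
    else some (PySem.Dict.getD pvWsMap c c)))

-- ===== PRECONDITION & SPEC =====
def Spec_clean_special_chars_py (text : String) (out : String) : Prop := out = clean_special_chars_py_alt text
instance (text : String) (out : String) : Decidable (Spec_clean_special_chars_py text out) := by unfold Spec_clean_special_chars_py; infer_instance

-- ===== CLAIM (what is proved, stated in full; the proofs are below) =====
def Claim_equal_clean_special_chars_py : Prop := ∀ (text : String), Dom_clean_special_chars_py text → Spec_clean_special_chars_py text (clean_special_chars_py text)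

-- ===== LEMMAS AND PROOFS =====

-- replace with a one-char pattern and empty replacement = delete that character
theorem pv_go_remove (a : Char) : ∀ (l : List Char) (fuel : Nat) (acc : List Char),
    l.length ≤ fuel →
    PySem.Chars.replace.go [a] [] fuel l acc = acc.reverse ++ l.filter (fun c => c != a) := by
  intro l
  induction l with
  | nil =>
    intro fuel acc _
    cases fuel <;> simp [PySem.Chars.replace.go]
  | cons c t ih =>
    intro fuel acc h
    cases fuel with
    | zero => simp at h
    | succ n =>
      by_cases hc : a = c
      · subst hc
        simp [PySem.Chars.replace.go, List.isPrefixOf, ih n acc (by simpa using h)]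
      · simp [PySem.Chars.replace.go, List.isPrefixOf, hc, ih n (c :: acc) (by simpa using h)]
        simp [Ne.symm hc]

theorem pv_replace_remove (l : List Char) (a : Char) :
    PySem.Chars.replace l [a] [] = l.filter (fun c => c != a) := by
  simpa [PySem.Chars.replace] using pv_go_remove a l l.length [] le_rfl

-- replace with a one-char pattern and a one-char replacement = map that character
theorem pv_go_map (a b : Char) : ∀ (l : List Char) (fuel : Nat) (acc : List Char),
    l.length ≤ fuel →
    PySem.Chars.replace.go [a] [b] fuel l acc = acc.reverse ++ l.map (fun c => if c = a then b else c) := by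
  intro l
  induction l with
  | nil =>
    intro fuel acc _
    cases fuel <;> simp [PySem.Chars.replace.go]
  | cons c t ih =>
    intro fuel acc h
    cases fuel with
    | zero => simp at h
    | succ n =>
      by_cases hc : a = c
      · subst hc
        simp [PySem.Chars.replace.go, List.isPrefixOf, ih n (b :: acc) (by simpa using h)]
      · simp [PySem.Chars.replace.go, List.isPrefixOf, hc, ih n (c :: acc) (by simpa using h),
          Ne.symm hc]

theorem pv_replace_map (a b : Char) (l : List Char) :
    PySem.Chars.replace l [a] [b] = l.map (fun c => if c = a then b else c) := by
  simpa [PySem.Chars.replace] using pv_go_map a b l l.length [] le_rfl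

-- replace is the identity when the pattern's first character does not occur
theorem pv_go_noocc (a : Char) (rest new : List Char) :
    ∀ (l : List Char) (fuel : Nat) (acc : List Char),
    l.length ≤ fuel → a ∉ l →
    PySem.Chars.replace.go (a :: rest) new fuel l acc = acc.reverse ++ l := by
  intro l
  induction l with
  | nil =>
    intro fuel acc _ _
    cases fuel <;> simp [PySem.Chars.replace.go]
  | cons c t ih =>
    intro fuel acc h hm
    cases fuel with
    | zero => simp at h
    | succ n =>
      have hc : ¬ a = c := fun hh => hm (hh ▸ List.mem_cons_self)
      have hm' : a ∉ t := fun hh => hm (List.mem_cons_of_mem _ hh)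
      simp [PySem.Chars.replace.go, List.isPrefixOf, hc,
        ih n (c :: acc) (by simpa using h) hm']

theorem pv_replace_noocc (a : Char) (rest new l : List Char) (hm : a ∉ l) :
    PySem.Chars.replace l (a :: rest) new = l := by
  simpa [PySem.Chars.replace] using pv_go_noocc a rest new l l.length [] le_rfl hm

-- the fold of per-character deletions = one filter
theorem pv_foldl_filter (cs : List Char) : ∀ (l : List Char),
    cs.foldl (fun t c => t.filter (fun x => x != c)) l = l.filter (fun x => !cs.contains x) := by
  induction cs with
  | nil => intro l; simp
  | cons c cs ih =>
    intro l
    simp only [List.foldl_cons, ih, List.filter_filter]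
    refine List.filter_congr ?_
    intro x _
    by_cases hx : x = c <;> simp [hx]

-- the string-level fold of replaces, seen on toList
theorem pv_string_foldl_toList (cs : List Char) : ∀ (s : String),
    (cs.foldl (fun t ch => PySem.Str.replace t (String.singleton ch) "") s).toList
      = cs.foldl (fun l ch => PySem.Chars.replace l [ch] []) s.toList := by
  induction cs with
  | nil => intro s; simp
  | cons c cs ih =>
    intro s
    simp only [List.foldl_cons, ih]
    congr 1
    simp [PySem.Str.toList_replace, String.singleton]

theorem pv_set_contains (c : Char) :
    PySem.Set.contains pvSpecialSet c
      = ("!@#$%^&*()_+{}|:\"<>?~`-=[]\\;\\',./".toList).contains c := by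
  rw [Bool.eq_iff_iff]
  simp [pvSpecialSet, PySem.Set.mem_ofList]

-- the chain of three whitespace maps = one dictionary lookup
theorem pv_ws (c : Char) :
    (if (if (if c = '\n' then ' ' else c) = '\r' then ' ' else (if c = '\n' then ' ' else c)) = '\t'
      then ' '
      else (if (if c = '\n' then ' ' else c) = '\r' then ' ' else (if c = '\n' then ' ' else c)))
    = PySem.Dict.getD pvWsMap c c := by
  by_cases h1 : c = '\n'
  · subst h1; decide
  · by_cases h2 : c = '\r'
    · subst h2; decide
    · by_cases h3 : c = '\t'
      · subst h3; decide
      · simp [h1, h2, h3, pvWsMap, PySem.Dict.getD, PySem.Dict.get?,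
          Ne.symm h1, Ne.symm h2, Ne.symm h3]

-- filter + three maps = B's single-pass filterMap
theorem pv_onepass : ∀ (l : List Char),
    ((((l.filter (fun x => !("!@#$%^&*()_+{}|:\"<>?~`-=[]\\;\\',./".toList).contains x)).map
        (fun c => if c = '\n' then ' ' else c)).map
        (fun c => if c = '\r' then ' ' else c)).map
        (fun c => if c = '\t' then ' ' else c))
    = l.filterMap (fun c =>
        if PySem.Set.contains pvSpecialSet c then none
        else some (PySem.Dict.getD pvWsMap c c)) := by
  intro l
  induction l with
  | nil => simp
  | cons c t ih =>
    rw [List.filter_cons, List.filterMap_cons, pv_set_contains c]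
    cases hc : ("!@#$%^&*()_+{}|:\"<>?~`-=[]\\;\\',./".toList).contains c
    · simp only [Bool.not_false]
      rw [if_pos trivial, if_neg (by decide : ¬ false = true)]
      simp only [List.map_cons]
      rw [pv_ws c, ih]
    · simp only [Bool.not_true]
      rw [if_pos trivial]
      exact ih

-- '<' survives neither the filter nor the maps
theorem pv_no_lt (l : List Char) :
    '<' ∉ (((l.filter (fun x => !("!@#$%^&*()_+{}|:\"<>?~`-=[]\\;\\',./".toList).contains x)).map
        (fun c => if c = '\n' then ' ' else c)).map
        (fun c => if c = '\r' then ' ' else c)).map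
        (fun c => if c = '\t' then ' ' else c) := by
  intro hmem
  simp only [List.mem_map, List.mem_filter] at hmem
  obtain ⟨x2, ⟨x1, ⟨x0, ⟨hx0, hP⟩, hf1⟩, hf2⟩, hf3⟩ := hmem
  split_ifs at hf3 <;> try exact absurd hf3 (by decide)
  subst hf3
  split_ifs at hf2 <;> try exact absurd hf2 (by decide)
  subst hf2
  split_ifs at hf1 <;> try exact absurd hf1 (by decide)
  subst hf1
  simp at hP

-- ===== VERDICT (by name: the statement is the Claim_ definition above) =====
theorem clean_special_chars_py_spec : Claim_equal_clean_special_chars_py := by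
  intro text _
  unfold Spec_clean_special_chars_py clean_special_chars_py clean_special_chars_py_alt
  apply String.ext
  have hfun : (fun l ch => PySem.Chars.replace l [ch] [])
      = (fun (t : List Char) (c : Char) => t.filter (fun x => x != c)) := by
    funext t c; exact pv_replace_remove t c
  have hn : ("\n" : String).toList = ['\n'] := rfl
  have hr : ("\r" : String).toList = ['\r'] := rfl
  have ht : ("\t" : String).toList = ['\t'] := rfl
  have hs : (" " : String).toList = [' '] := rfl
  have hbr : ("<br />" : String).toList = '<' :: "br />".toList := rfl
  simp only [PySem.Str.toList_replace, pv_string_foldl_toList, hn, hr, ht, hs, hbr, hfun,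
    pv_foldl_filter, pv_replace_map]
  rw [pv_replace_noocc _ _ _ _ (pv_no_lt text.toList), pv_onepass, String.toList_ofList]
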